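-- pv_equiv track=rewrite | github.com/yennanliu/CS_basics | leetcode_python/Hash_table/number-of-boomerangs.py | numberOfBoomerangs
-- ===== SOURCE A (Python) =====
-- import collections
-- import collections
-- import collections
--
-- def numberOfBoomerangs(points):
--     """
--     :type points: List[List[int]]
--     :rtype: int
--     """
--     result = 0
--
--     for i in range(len(points)):
--         group = collections.defaultdict(int)
--         for j in range(len(points)):
--             if j == i:
--                 continue
--             dx, dy =  points[i][0] - points[j][0], points[i][1] - points[j][1]
--             group[dx**2 + dy**2] += 1
--
--         for _, v in group.items():
--             if v > 1:
--                 result += v * (v-1)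
--
--     return result
-- ===== SOURCE B (Python) =====
-- def numberOfBoomerangs(points):
--     """
--     :type points: List[List[int]]
--     :rtype: int
--     """
--     result = 0
--     n = len(points)
--     for i in range(n):
--         ds = sorted((points[i][0] - points[j][0]) ** 2 + (points[i][1] - points[j][1]) ** 2
--                     for j in range(n) if j != i)
--         run = 0
--         prev = None
--         for d in ds:
--             if d == prev:
--                 run += 1
--             else:
--                 result += run * (run - 1)
--                 run = 1
--                 prev = d
--         result += run * (run - 1)
--     return result
-- ===== Notes on version B (the rewrite author's own statement) =====
-- stated objective: alternative
-- what changed: The per-anchor hash map of distance counts is replaced by sort-then-scan: squared distances to the anchor are sorted and equal-distance runs are counted in a single linear scan, adding run*(run-1) at each run boundary; no dictionary is used at all.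
import Mathlib
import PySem

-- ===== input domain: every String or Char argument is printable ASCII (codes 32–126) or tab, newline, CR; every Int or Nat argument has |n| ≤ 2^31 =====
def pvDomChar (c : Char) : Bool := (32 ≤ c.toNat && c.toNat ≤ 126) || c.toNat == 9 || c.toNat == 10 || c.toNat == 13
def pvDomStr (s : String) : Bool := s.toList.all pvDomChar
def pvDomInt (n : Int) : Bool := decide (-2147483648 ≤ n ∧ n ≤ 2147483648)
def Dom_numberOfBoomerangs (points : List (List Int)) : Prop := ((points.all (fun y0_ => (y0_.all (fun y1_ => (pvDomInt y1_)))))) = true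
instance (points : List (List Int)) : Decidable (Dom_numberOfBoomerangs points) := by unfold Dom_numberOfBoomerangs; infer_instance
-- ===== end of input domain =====

-- B replaces the per-anchor distance hash map by sort-then-scan (sorted distances, run-length counting); same cost class, no speed claim.

-- ===== PORT A =====
def numberOfBoomerangs (points : List (List Int)) : Int :=
  (PySem.List.pyRange 0 points.length 1).foldl (fun result i =>
    let group : PySem.Dict Int Int :=
      (PySem.List.pyRange 0 points.length 1).foldl (fun g j =>
        if j == i then g
        else
          let dx := PySem.List.pyGetD (PySem.List.pyGetD points i []) 0 0
                    - PySem.List.pyGetD (PySem.List.pyGetD points j []) 0 0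
          let dy := PySem.List.pyGetD (PySem.List.pyGetD points i []) 1 0
                    - PySem.List.pyGetD (PySem.List.pyGetD points j []) 1 0
          g.modify (dx ^ 2 + dy ^ 2) 0 (· + 1)) PySem.Dict.empty
    group.items.foldl (fun r p => if p.2 > 1 then r + p.2 * (p.2 - 1) else r) result) 0

-- ===== PORT B =====
-- one run-scan step: state = (result, run, prev)
def pvScanStep (st : Int × Int × Option Int) (d : Int) : Int × Int × Option Int :=
  if some d == st.2.2 then (st.1, st.2.1 + 1, st.2.2)
  else (st.1 + st.2.1 * (st.2.1 - 1), 1, some d)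

def numberOfBoomerangs_alt (points : List (List Int)) : Int :=
  let n := points.length
  (PySem.List.pyRange 0 n 1).foldl (fun result i =>
    let ds := PySem.List.sorted
      (((PySem.List.pyRange 0 n 1).filter (fun j => !(j == i))).map (fun j =>
        (PySem.List.pyGetD (PySem.List.pyGetD points i []) 0 0
          - PySem.List.pyGetD (PySem.List.pyGetD points j []) 0 0) ^ 2
        + (PySem.List.pyGetD (PySem.List.pyGetD points i []) 1 0
          - PySem.List.pyGetD (PySem.List.pyGetD points j []) 1 0) ^ 2))
      (fun x => x) false
    let st := ds.foldl pvScanStep (result, 0, (none : Option Int))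
    st.1 + st.2.1 * (st.2.1 - 1)) 0

-- ===== PRECONDITION & SPEC =====
-- Pre_ excludes exactly the inputs where A raises IndexError: two or more points with some point of length < 2.
def Pre_numberOfBoomerangs (points : List (List Int)) : Prop :=
  points.length ≤ 1 ∨ ∀ p ∈ points, 2 ≤ p.length
instance (points : List (List Int)) : Decidable (Pre_numberOfBoomerangs points) := by unfold Pre_numberOfBoomerangs; infer_instance
def pvWitness_numberOfBoomerangs : List (List Int) := [[0, 0], [1, 0], [2, 0]]

def Spec_numberOfBoomerangs (points : List (List Int)) (out : Int) : Prop := out = numberOfBoomerangs_alt points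
instance (points : List (List Int)) (out : Int) : Decidable (Spec_numberOfBoomerangs points out) := by unfold Spec_numberOfBoomerangs; infer_instance

-- ===== CLAIM (what is proved, stated in full; the proofs are below) =====
def Claim_equal_numberOfBoomerangs : Prop := ∀ (points : List (List Int)), Dom_numberOfBoomerangs points → Pre_numberOfBoomerangs points → Spec_numberOfBoomerangs points (numberOfBoomerangs points)

-- ===== LEMMAS AND PROOFS =====

-- a loop that skips some elements and updates on a derived key = the same update loop over the filtered, mapped list
theorem pv_foldl_skip_map {α β σ : Type} (l : List α) (cond : α → Bool) (k : α → β)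
    (F : σ → β → σ) (s : σ) :
    l.foldl (fun s j => if cond j then s else F s (k j)) s
      = ((l.filter (fun j => !cond j)).map k).foldl F s := by
  induction l generalizing s with
  | nil => rfl
  | cons a l ih =>
    by_cases h : cond a = true
    · simp [List.foldl_cons, h, ih]
    · simp only [Bool.not_eq_true] at h
      simp [List.foldl_cons, h, ih]

-- A's per-anchor score of a multiset of distances: sum over distinct distances of v*(v-1)
def pvPhi (m : List Int) : Int :=
  ((PySem.Dict.counter m).items.map (fun p => if p.2 > 1 then p.2 * (p.2 - 1) else 0)).sum

-- pvPhi depends only on the multiset of distances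
theorem pvPhi_perm (l l' : List Int) (h : l.Perm l') : pvPhi l = pvPhi l' := by
  unfold pvPhi
  rw [PySem.Dict.items_counter, PySem.Dict.items_counter, List.map_map, List.map_map]
  have hperm : (PySem.Set.ofList l).Perm (PySem.Set.ofList l') :=
    (List.perm_ext_iff_of_nodup (PySem.Set.nodup_ofList l) (PySem.Set.nodup_ofList l')).mpr
      (fun a => by simp [PySem.Set.mem_ofList, h.mem_iff])
  have hcnt : ∀ k : Int, l.count k = l'.count k := fun k => h.count_eq k
  calc ((PySem.Set.ofList l).map ((fun p : Int × Int => if p.2 > 1 then p.2 * (p.2 - 1) else 0)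
          ∘ (fun k => (k, (l.count k : Int))))).sum
      = ((PySem.Set.ofList l).map ((fun p : Int × Int => if p.2 > 1 then p.2 * (p.2 - 1) else 0)
          ∘ (fun k => (k, (l'.count k : Int))))).sum := by
        apply congrArg
        apply List.map_congr_left
        intro k _
        simp [Function.comp, hcnt k]
    _ = ((PySem.Set.ofList l').map ((fun p : Int × Int => if p.2 > 1 then p.2 * (p.2 - 1) else 0)
          ∘ (fun k => (k, (l'.count k : Int))))).sum :=
        (hperm.map _).sum_eq

-- the per-distance score f(c) = c*(c-1) (0 for c ≤ 1) grows by 2c when one more arrival is seen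
theorem pv_f_step (c : Int) (hc : 1 ≤ c) :
    (if c + 1 > 1 then (c + 1) * (c + 1 - 1) else 0)
      = (if c > 1 then c * (c - 1) else 0) + 2 * c := by
  have h2 : c + 1 > 1 := by omega
  simp only [h2, if_true]
  by_cases hgt : c > 1
  · simp [hgt]; ring
  · have : c = 1 := by omega
    simp [this]

theorem pv_sum_map_update (S : List Int) (g g' : Int → Int) (d : Int) (e : Int)
    (hnd : S.Nodup) (hmem : d ∈ S) (h1 : g' d = g d + e)
    (h2 : ∀ k ∈ S, k ≠ d → g' k = g k) :
    (S.map g').sum = (S.map g).sum + e := by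
  induction S with
  | nil => cases hmem
  | cons a S ih =>
    rcases List.mem_cons.mp hmem with rfl | hmem'
    · have : ∀ k ∈ S, g' k = g k := fun k hk =>
        h2 k (List.mem_cons_of_mem _ hk) (fun h => (List.nodup_cons.mp hnd).1 (h ▸ hk))
      simp [List.map_cons, h1, List.map_congr_left this]
      ring
    · have ha : g' a = g a := h2 a (List.mem_cons_self) (fun h => (List.nodup_cons.mp hnd).1 (h ▸ hmem'))
      have := ih (List.nodup_cons.mp hnd).2 hmem' (fun k hk hne => h2 k (List.mem_cons_of_mem _ hk) hne)
      simp [List.map_cons, ha, this]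
      ring

theorem pv_phi_append (l : List Int) (d : Int) :
    pvPhi (l ++ [d]) = pvPhi l + 2 * (l.count d : Int) := by
  unfold pvPhi
  rw [PySem.Dict.items_counter, PySem.Dict.items_counter, List.map_map, List.map_map,
      PySem.Set.ofList_append_singleton]
  by_cases hd : d ∈ l
  · have hset : (PySem.Set.ofList l).add d = PySem.Set.ofList l := by
      simp [PySem.Set.add, (PySem.Set.mem_ofList l d).mpr hd]
    rw [hset]
    set g : Int → Int := fun k =>
      (fun p : Int × Int => if p.2 > 1 then p.2 * (p.2 - 1) else 0) ((fun k => (k, (l.count k : Int))) k) with hg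
    set g' : Int → Int := fun k =>
      (fun p : Int × Int => if p.2 > 1 then p.2 * (p.2 - 1) else 0) ((fun k => (k, ((l ++ [d]).count k : Int))) k) with hg'
    apply pv_sum_map_update (PySem.Set.ofList l) g g' d (2 * (l.count d : Int))
      (PySem.Set.nodup_ofList l) ((PySem.Set.mem_ofList l d).mpr hd)
    · have hc : 1 ≤ l.count d := List.one_le_count_iff.mpr hd
      have hcnt : ((l ++ [d]).count d : Int) = (l.count d : Int) + 1 := by
        rw [List.count_append]; push_cast [List.count_singleton]; simp
      simp only [hg, hg']
      rw [hcnt]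
      exact pv_f_step _ (by exact_mod_cast hc)
    · intro k hk hne
      have : (l ++ [d]).count k = l.count k := by
        simp [List.count_append, Ne.symm hne]
      simp only [hg, hg']
      rw [this]
  · have hset : (PySem.Set.ofList l).add d = PySem.Set.ofList l ++ [d] := by
      simp [PySem.Set.add, (PySem.Set.mem_ofList l d)]
      intro h; exact absurd h hd
    rw [hset, List.map_append]
    have hcd : l.count d = 0 := List.count_eq_zero.mpr hd
    have hmain : ∀ k ∈ PySem.Set.ofList l,
        (fun k => if ((l ++ [d]).count k : Int) > 1 then ((l ++ [d]).count k : Int) * (((l ++ [d]).count k : Int) - 1) else 0) k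
        = (fun k => if (l.count k : Int) > 1 then (l.count k : Int) * ((l.count k : Int) - 1) else 0) k := by
      intro k hk
      have hkl : k ∈ l := (PySem.Set.mem_ofList l k).mp hk
      have hne : k ≠ d := fun h => hd (h ▸ hkl)
      have : (l ++ [d]).count k = l.count k := by
        simp [List.count_append, Ne.symm hne]
      simp [this]
    simp only [Function.comp_def] at *
    rw [List.map_congr_left hmain]
    have : ((l ++ [d]).count d : Int) = 1 := by
      simp [List.count_append, hcd]
    simp [hcd]

-- appending k copies of a fresh distance adds k*(k-1)
theorem pv_phi_append_replicate (l : List Int) (d : Int) (k : Nat) (hd : d ∉ l) :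
    pvPhi (l ++ List.replicate k d) = pvPhi l + (k : Int) * ((k : Int) - 1) := by
  induction k with
  | zero => simp
  | succ k ih =>
    have : l ++ List.replicate (k + 1) d = (l ++ List.replicate k d) ++ [d] := by
      simp [List.replicate_succ' (n := k)]
    rw [this, pv_phi_append, ih]
    have hcnt : (l ++ List.replicate k d).count d = k := by
      simp [List.count_append, List.count_eq_zero.mpr hd]
    rw [hcnt]
    push_cast
    ring

-- run-scan invariant: from state (acc, k, some d), a sorted tail all ≥ d contributes pvPhi of (k copies of d ++ tail)
theorem pvPhi_nil : pvPhi [] = 0 := rfl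

theorem pv_scan (l : List Int) (hs : l.Pairwise (· ≤ ·)) (acc : Int) (k : Nat) (d : Int)
    (hle : ∀ x ∈ l, d ≤ x) :
    (l.foldl pvScanStep (acc, (k : Int), some d)).1
      + (l.foldl pvScanStep (acc, (k : Int), some d)).2.1
        * ((l.foldl pvScanStep (acc, (k : Int), some d)).2.1 - 1)
      = acc + pvPhi (List.replicate k d ++ l) := by
  induction l generalizing acc k d with
  | nil =>
    simp only [List.foldl_nil, List.append_nil]
    rw [show List.replicate k d = [] ++ List.replicate k d from (List.nil_append _).symm,
        pv_phi_append_replicate [] d k (by simp), pvPhi_nil]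
    ring
  | cons x rest ih =>
    have hxrest : ∀ y ∈ rest, x ≤ y := fun y hy => (List.pairwise_cons.mp hs).1 y hy
    have hsrest : rest.Pairwise (· ≤ ·) := (List.pairwise_cons.mp hs).2
    by_cases hxd : x = d
    · subst hxd
      simp only [List.foldl_cons, pvScanStep, beq_self_eq_true, if_true]
      have hlerest : ∀ y ∈ rest, x ≤ y := hxrest
      have ih1 := ih hsrest acc (k + 1) x hlerest
      push_cast at ih1
      rw [ih1]
      have : List.replicate k x ++ x :: rest = List.replicate (k + 1) x ++ rest := by
        simp [List.replicate_succ' (n := k)]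
      rw [this]
    · have hbeq : (some x == some d) = false := by
        simp; exact fun h => hxd h
      simp only [List.foldl_cons, pvScanStep, hbeq, Bool.false_eq_true, if_false]
      have ih1 := ih hsrest (acc + (k : Int) * ((k : Int) - 1)) 1 x hxrest
      rw [Nat.cast_one] at ih1
      rw [ih1]
      have hdnot : d ∉ x :: rest := by
        intro hmem
        rcases List.mem_cons.mp hmem with h | h
        · exact hxd h.symm
        · have h1 := hxrest d h
          have h2 : d < x := lt_of_le_of_ne (hle x List.mem_cons_self) (fun h => hxd h.symm)
          omega
      have h1 : pvPhi (List.replicate k d ++ x :: rest)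
          = pvPhi ((x :: rest) ++ List.replicate k d) :=
        pvPhi_perm _ _ (List.perm_append_comm)
      have h2 : pvPhi ((x :: rest) ++ List.replicate k d)
          = pvPhi (x :: rest) + (k : Int) * ((k : Int) - 1) :=
        pv_phi_append_replicate _ _ _ hdnot
      have h3 : List.replicate 1 x ++ rest = x :: rest := by simp
      rw [h3, h1, h2]
      ring

-- run-scan from the initial state computes acc + pvPhi over any sorted list
theorem pv_scan_top (l : List Int) (hs : l.Pairwise (· ≤ ·)) (acc : Int) :
    (l.foldl pvScanStep (acc, 0, (none : Option Int))).1
      + (l.foldl pvScanStep (acc, 0, (none : Option Int))).2.1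
        * ((l.foldl pvScanStep (acc, 0, (none : Option Int))).2.1 - 1)
      = acc + pvPhi l := by
  cases l with
  | nil => simp [pvPhi_nil]
  | cons x rest =>
    have hxrest : ∀ y ∈ rest, x ≤ y := fun y hy => (List.pairwise_cons.mp hs).1 y hy
    have hsrest : rest.Pairwise (· ≤ ·) := (List.pairwise_cons.mp hs).2
    have hbeq : (some x == (none : Option Int)) = false := by simp
    simp only [List.foldl_cons, pvScanStep, hbeq, Bool.false_eq_true, if_false]
    have ih1 := pv_scan rest hsrest (acc + 0 * (0 - 1)) 1 x hxrest
    rw [Nat.cast_one] at ih1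
    rw [ih1]
    simp

-- A's per-anchor counting pass equals result + pvPhi of the distance list
theorem pv_A_anchor (ds : List Int) (r : Int) :
    (PySem.Dict.counter ds).items.foldl (fun r p => if p.2 > 1 then r + p.2 * (p.2 - 1) else r) r
      = r + pvPhi ds := by
  have hA : (PySem.Dict.counter ds).items.foldl
      (fun r p => if p.2 > 1 then r + p.2 * (p.2 - 1) else r) r
      = (PySem.Dict.counter ds).items.foldl
      (fun r p => r + (if p.2 > 1 then p.2 * (p.2 - 1) else 0)) r := by
    apply PySem.List.foldl_congr_mem
    intro acc p _
    by_cases h : p.2 > 1 <;> simp [h]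
  rw [hA, PySem.List.foldl_add]
  rfl

-- ===== VERDICT (by name: the statement is the Claim_ definition above) =====
theorem numberOfBoomerangs_spec : Claim_equal_numberOfBoomerangs := by
  intro points _ _
  unfold Spec_numberOfBoomerangs numberOfBoomerangs numberOfBoomerangs_alt
  apply PySem.List.foldl_congr_mem
  intro result i _
  simp only []
  rw [pv_foldl_skip_map (σ := PySem.Dict Int Int)
        (PySem.List.pyRange 0 points.length 1) (fun j => j == i)
        (fun j => (PySem.List.pyGetD (PySem.List.pyGetD points i []) 0 0
                    - PySem.List.pyGetD (PySem.List.pyGetD points j []) 0 0) ^ 2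
                  + (PySem.List.pyGetD (PySem.List.pyGetD points i []) 1 0
                    - PySem.List.pyGetD (PySem.List.pyGetD points j []) 1 0) ^ 2)
        (fun g d => g.modify d 0 (· + 1)) PySem.Dict.empty]
  rw [← PySem.Dict.counter_eq_foldl]
  rw [pv_A_anchor]
  set ds := ((PySem.List.pyRange 0 points.length 1).filter (fun j => !(j == i))).map
      (fun j => (PySem.List.pyGetD (PySem.List.pyGetD points i []) 0 0
                  - PySem.List.pyGetD (PySem.List.pyGetD points j []) 0 0) ^ 2
                + (PySem.List.pyGetD (PySem.List.pyGetD points i []) 1 0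
                  - PySem.List.pyGetD (PySem.List.pyGetD points j []) 1 0) ^ 2) with hds
  have hpair : (PySem.List.sorted ds (fun x => x) false).Pairwise (· ≤ ·) :=
    PySem.List.sorted_pairwise ds (fun x => x)
  rw [pv_scan_top _ hpair result]
  rw [pvPhi_perm _ _ (PySem.List.sorted_perm ds (fun x => x) false)]
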